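-- pv_equiv track=rewrite | github.com/lchaloupsky/Medical-Reports-Generator | preprocessors/time_preprocessor.py | _is_time
-- ===== SOURCE A (Python) =====
-- def _is_time(text: str, start: int) -> bool:
--     for i in range(start - 1, -1, -1):
--         if str.isspace(text[i]):
--             continue
--
--         if str.isdigit(text[i]):
--             return True
--         else:
--             return False
--
--     return False
-- ===== SOURCE B (Python) =====
-- def _is_time(text: str, start: int) -> bool:
--     ans = False
--     for c in text[:max(start, 0)]:
--         if c.isdigit():
--             ans = True
--         elif not c.isspace():
--             ans = False
--     return ans
-- ===== Notes on version B (the rewrite author's own statement) =====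
-- stated objective: alternative
-- what changed: B scans the prefix FORWARD in a single pass with a boolean accumulator (set on digit, cleared on other non-space, kept on space) instead of A's backward index loop with early returns; the accumulator after the pass equals A's answer.
import Mathlib
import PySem

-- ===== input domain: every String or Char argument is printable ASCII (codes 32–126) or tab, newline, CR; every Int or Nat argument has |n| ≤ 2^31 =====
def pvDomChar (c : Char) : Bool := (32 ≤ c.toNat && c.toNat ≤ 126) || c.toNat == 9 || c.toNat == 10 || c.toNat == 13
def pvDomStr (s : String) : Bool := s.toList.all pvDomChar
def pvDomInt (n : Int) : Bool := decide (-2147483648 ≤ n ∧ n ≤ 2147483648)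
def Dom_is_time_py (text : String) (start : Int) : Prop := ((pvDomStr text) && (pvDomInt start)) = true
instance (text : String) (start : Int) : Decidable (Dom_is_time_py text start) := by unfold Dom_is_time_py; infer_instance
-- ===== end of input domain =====

-- B scans the prefix FORWARD once with a boolean accumulator instead of A's backward early-return loop (same cost, different traversal).

-- ===== PORT A =====
-- the 'for i in range(start-1,-1,-1)' loop with its early returns, over the index list
def isTimeLoopA (cs : List Char) : List Int → Bool
  | [] => false
  | i :: rest =>
    match PySem.List.pyGet? cs i with
    | none => false   -- text[i] raises IndexError: outside Pre_is_time_py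
    | some c =>
      if PySem.Chars.isspace c then isTimeLoopA cs rest
      else PySem.Chars.isdigit c

def is_time_py (text : String) (start : Int) : Bool :=
  isTimeLoopA text.toList (PySem.List.pyRange (start - 1) (-1) (-1))

-- ===== PORT B =====
-- forward pass: 'ans' set on a digit, cleared on any other non-space, kept on whitespace
def is_time_py_alt (text : String) (start : Int) : Bool :=
  (PySem.List.slice text.toList none (some (max start 0))).foldl
    (fun ans c =>
      if PySem.Chars.isdigit c then true
      else if !(PySem.Chars.isspace c) then false
      else ans) false

-- ===== PRECONDITION & SPEC =====
-- Pre_ excludes exactly the inputs where A raises IndexError: start past the end of text (text[start-1] out of range).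
def Pre_is_time_py (text : String) (start : Int) : Prop := start ≤ (text.toList.length : Int)
instance (text : String) (start : Int) : Decidable (Pre_is_time_py text start) := by unfold Pre_is_time_py; infer_instance
def pvWitness_is_time_py : String × Int := ("12 ", 3)

def Spec_is_time_py (text : String) (start : Int) (out : Bool) : Prop := out = is_time_py_alt text start
instance (text : String) (start : Int) (out : Bool) : Decidable (Spec_is_time_py text start out) := by unfold Spec_is_time_py; infer_instance


-- ===== CLAIM (what is proved, stated in full; the proofs are below) =====
def Claim_equal_is_time_py : Prop := ∀ (text : String) (start : Int), Dom_is_time_py text start → Pre_is_time_py text start → Spec_is_time_py text start (is_time_py text start)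

-- ===== LEMMAS AND PROOFS =====

-- proof-side reading of the scan: skip spaces from the right, then digit-test; 'ans' is the value when all is whitespace
def goSkipD : List Char → Bool → Bool
  | [], ans => ans
  | c :: r, ans => if PySem.Chars.isspace c then goSkipD r ans else PySem.Chars.isdigit c

lemma digit_not_space (c : Char) (h : PySem.Chars.isdigit c = true) : PySem.Chars.isspace c = false := by
  simp only [PySem.Chars.isdigit, PySem.Chars.isspace, Bool.and_eq_true, decide_eq_true_eq] at h ⊢
  obtain ⟨h1, h2⟩ := h
  rw [Char.le_def, UInt32.le_iff_toNat_le] at h1 h2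
  have e0 : ('0'.val).toNat = 48 := by decide
  have e9 : ('9'.val).toNat = 57 := by decide
  have hc : Char.toNat c = c.val.toNat := rfl
  simp only [Bool.or_eq_false_iff, Bool.and_eq_false_iff, decide_eq_false_iff_not, hc]
  omega

-- B's forward fold computes the backward skip-scan of the reversed list
lemma foldB_eq_goSkipD (l : List Char) (ans : Bool) :
    l.foldl (fun ans c =>
      if PySem.Chars.isdigit c then true
      else if !(PySem.Chars.isspace c) then false
      else ans) ans = goSkipD l.reverse ans := by
  induction l using List.reverseRecOn generalizing ans with
  | nil => rfl
  | append_singleton t c ih =>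
    rw [List.foldl_append, List.reverse_append]
    simp only [List.foldl_cons, List.foldl_nil, List.reverse_cons, List.reverse_nil,
      List.nil_append, List.singleton_append, goSkipD]
    by_cases hd : PySem.Chars.isdigit c = true
    · rw [if_pos hd, if_neg (by simp [digit_not_space c hd]), hd]
    · by_cases hs : PySem.Chars.isspace c = true
      · rw [if_neg hd, if_neg (by simp [hs]), if_pos hs]
        exact ih ans
      · rw [if_neg hd, if_pos (by simp [hs]), if_neg hs]
        rw [Bool.not_eq_true] at hd
        exact hd.symm

lemma pyRange_down (n : Nat) :
    PySem.List.pyRange ((n : Int) - 1) (-1) (-1) = (List.range n).map (fun k : Nat => (n : Int) - 1 - (k : Int)) := by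
  unfold PySem.List.pyRange
  rw [if_neg (by norm_num : ¬ ((-1 : Int) = 0)), if_neg (by norm_num : ¬ ((0:Int) < -1))]
  cases n with
  | zero => rw [if_neg (by norm_num : ¬ ((-1 : Int) < (0 : Nat) - 1))]; simp
  | succ m =>
    rw [if_pos (by push_cast; omega : ((-1 : Int) < ((m + 1 : Nat) : Int) - 1))]
    have h2 : (((m + 1 : Nat) : Int) - 1 - (-1) + -(-1) - 1) / -(-1) = ((m + 1 : Nat) : Int) := by
      push_cast; omega
    rw [h2, Int.toNat_natCast]
    apply List.map_congr_left
    intro k _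
    push_cast; ring

lemma loopA_eq_goSkipD (cs : List Char) (n : Nat) (h : n ≤ cs.length) :
    isTimeLoopA cs ((List.range n).map (fun k : Nat => (n : Int) - 1 - (k : Int))) = goSkipD ((cs.take n).reverse) false := by
  induction n with
  | zero => simp [isTimeLoopA, goSkipD]
  | succ m ih =>
    have hm : m < cs.length := by omega
    have hrange : (List.range (m + 1)).map (fun k : Nat => ((m + 1 : Nat) : Int) - 1 - (k : Int))
        = (m : Int) :: (List.range m).map (fun k : Nat => (m : Int) - 1 - (k : Int)) := by
      rw [List.range_succ_eq_map, List.map_cons, List.map_map]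
      congr 1
      · push_cast; ring
      · apply List.map_congr_left
        intro k _
        simp only [Function.comp]
        push_cast; ring
    have hget : PySem.List.pyGet? cs ((m : Nat) : Int) = some cs[m] := by
      simp [PySem.List.pyGet?_natCast, List.getElem?_eq_getElem hm]
    have htake : (cs.take (m + 1)).reverse = cs[m] :: (cs.take m).reverse := by
      rw [List.take_add_one]
      simp [List.getElem?_eq_getElem hm]
    rw [hrange]
    simp only [isTimeLoopA, hget, htake, goSkipD]
    by_cases hs : PySem.Chars.isspace cs[m] = true
    · simp [hs, ih (by omega)]
    · simp [hs]

-- ===== VERDICT (by name: the statement is the Claim_ definition above) =====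
theorem is_time_py_spec : Claim_equal_is_time_py := by
  intro text start _ hpre
  unfold Pre_is_time_py at hpre
  unfold Spec_is_time_py is_time_py is_time_py_alt
  have hsl := PySem.List.slice_to text.toList (le_max_right start 0)
  rw [hsl, foldB_eq_goSkipD]
  by_cases hle : start ≤ 0
  · have hrange : PySem.List.pyRange (start - 1) (-1) (-1) = [] := by
      unfold PySem.List.pyRange
      rw [if_neg (by norm_num : ¬ ((-1 : Int) = 0)), if_neg (by norm_num : ¬ ((0:Int) < -1)),
          if_neg (by omega : ¬ ((-1 : Int) < start - 1))]
      simp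
    have hm : (max start 0).toNat = 0 := by omega
    rw [hrange, hm]
    simp [isTimeLoopA, goSkipD]
  · push_neg at hle
    obtain ⟨n, rfl⟩ : ∃ n : Nat, start = (n : Int) := ⟨start.toNat, by omega⟩
    have hlen : n ≤ text.toList.length := by omega
    have hm : (max (n : Int) 0).toNat = n := by omega
    rw [hm, pyRange_down, loopA_eq_goSkipD text.toList n hlen]
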